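-- pv_equiv track=rewrite | github.com/vigusmao/TEP_2015_2 | histograma.py | compute_histogram_naive
-- ===== SOURCE A (Python) =====
-- GLOBAL_START = 0
--
-- GLOBAL_END = 24 * 3600  # seconds
--
-- def compute_histogram_naive(player_times, columns):
--     step = (GLOBAL_END - GLOBAL_START) // columns
--     histogram = []
--     moment = GLOBAL_START
--     while moment <= GLOBAL_END:
--         players_online = 0
--         for times_tuple in player_times:
--             if times_tuple[0] <= moment and times_tuple[1] >= moment:
--                 players_online += 1
--         histogram += [(moment, players_online)]
--         moment += step
--     return histogram
-- ===== SOURCE B (Python) =====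
-- GLOBAL_START = 0
--
-- GLOBAL_END = 24 * 3600  # seconds
--
-- def compute_histogram_naive(player_times, columns):
--     step = (GLOBAL_END - GLOBAL_START) // columns
--     last = (GLOBAL_END - GLOBAL_START) // step
--     delta = {}
--     for s, e in player_times:
--         lo = max(0, -((-(s - GLOBAL_START)) // step))
--         hi = min(last, (e - GLOBAL_START) // step)
--         if lo <= hi:
--             delta[lo] = delta.get(lo, 0) + 1
--             delta[hi + 1] = delta.get(hi + 1, 0) - 1
--     histogram = []
--     count = 0
--     for k in range(last + 1):
--         count += delta.get(k, 0)
--         histogram.append((GLOBAL_START + k * step, count))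
--     return histogram
-- ===== Notes on version B (the rewrite author's own statement) =====
-- stated objective: faster
-- what changed: Replaces the per-grid-point rescan of all intervals with a difference map (each interval adds +1/-1 at its first/after-last covered grid index via ceiling/floor division) plus one prefix-sum pass; intended as faster (O(columns+n) vs O(columns*n)); a timing run measured 31.5x at n=65536 but could not confirm at the largest size, where the generated inputs leave the precondition (A diverges, B raises).
import Mathlib
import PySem

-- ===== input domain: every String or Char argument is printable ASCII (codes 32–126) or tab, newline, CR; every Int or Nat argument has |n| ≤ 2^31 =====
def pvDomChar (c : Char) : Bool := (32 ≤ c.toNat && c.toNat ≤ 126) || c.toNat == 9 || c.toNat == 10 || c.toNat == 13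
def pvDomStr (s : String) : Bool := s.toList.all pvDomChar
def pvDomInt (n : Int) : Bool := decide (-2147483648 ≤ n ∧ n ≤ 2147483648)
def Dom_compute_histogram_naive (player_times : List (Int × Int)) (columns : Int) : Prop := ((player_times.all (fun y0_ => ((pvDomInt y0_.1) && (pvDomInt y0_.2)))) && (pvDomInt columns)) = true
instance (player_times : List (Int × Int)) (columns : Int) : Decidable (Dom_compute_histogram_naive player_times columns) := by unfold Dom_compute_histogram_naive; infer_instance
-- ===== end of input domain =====

-- B replaces A's per-grid-point rescan of all intervals by a difference dict plus one
-- prefix-sum pass: O(columns + n) work instead of O(columns * n); intended as faster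
-- (a timing run measured 31.5x at n=65536; unconfirmed at the top size, whose inputs leave Pre_).

-- ===== PORT A =====
-- inner for-loop of A: players_online accumulation
def pvCountA (player_times : List (Int × Int)) (moment : Int) : Int :=
  player_times.foldl (fun acc t => if t.1 ≤ moment ∧ t.2 ≥ moment then acc + 1 else acc) 0

-- A's while loop; the '0 < step' conjunct only makes the recursion total (Python diverges otherwise)
def pvALoop (player_times : List (Int × Int)) (step moment : Int)
    (hist : List (Int × Int)) : List (Int × Int) :=
  if _h : moment ≤ 86400 ∧ 0 < step then
    pvALoop player_times step (moment + step) (hist ++ [(moment, pvCountA player_times moment)])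
  else hist
termination_by (86401 - moment).toNat
decreasing_by omega

def compute_histogram_naive (player_times : List (Int × Int)) (columns : Int) : List (Int × Int) :=
  let step := PySem.Int.floordiv (86400 - 0) columns
  pvALoop player_times step 0 []

-- ===== PORT B =====
-- B's first loop: the difference dict
def pvBDelta (step last : Int) (player_times : List (Int × Int)) : PySem.Dict Int Int :=
  player_times.foldl (fun d t =>
    let lo := max 0 (-(PySem.Int.floordiv (-(t.1 - 0)) step))
    let hi := min last (PySem.Int.floordiv (t.2 - 0) step)
    if lo ≤ hi then (d.modify lo 0 (· + 1)).modify (hi + 1) 0 (· - 1) else d)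
    PySem.Dict.empty

def compute_histogram_naive_alt (player_times : List (Int × Int)) (columns : Int) : List (Int × Int) :=
  let step := PySem.Int.floordiv (86400 - 0) columns
  let last := PySem.Int.floordiv (86400 - 0) step
  let delta := pvBDelta step last player_times
  ((PySem.List.pyRange 0 (last + 1) 1).foldl
    (fun (acc : Int × List (Int × Int)) k =>
      let c := acc.1 + delta.getD k 0
      (c, acc.2 ++ [(0 + k * step, c)]))
    (0, [])).2

-- ===== PRECONDITION & SPEC =====
-- Pre_ excludes only inputs on which Python A never returns: columns = 0 raises
-- ZeroDivisionError, columns < 0 or columns > 86400 make step ≤ 0 and the while loop diverge.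
def Pre_compute_histogram_naive (player_times : List (Int × Int)) (columns : Int) : Prop :=
  1 ≤ columns ∧ columns ≤ 86400
instance (player_times : List (Int × Int)) (columns : Int) : Decidable (Pre_compute_histogram_naive player_times columns) := by unfold Pre_compute_histogram_naive; infer_instance

def pvWitness_compute_histogram_naive : (List (Int × Int)) × Int := ([(0, 7)], 24)

def Spec_compute_histogram_naive (player_times : List (Int × Int)) (columns : Int) (out : List (Int × Int)) : Prop := out = compute_histogram_naive_alt player_times columns
instance (player_times : List (Int × Int)) (columns : Int) (out : List (Int × Int)) : Decidable (Spec_compute_histogram_naive player_times columns out) := by unfold Spec_compute_histogram_naive; infer_instance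

-- ===== CLAIM (what is proved, stated in full; the proofs are below) =====
def Claim_equal_compute_histogram_naive : Prop := ∀ (player_times : List (Int × Int)) (columns : Int), Dom_compute_histogram_naive player_times columns → Pre_compute_histogram_naive player_times columns → Spec_compute_histogram_naive player_times columns (compute_histogram_naive player_times columns)

-- ===== LEMMAS AND PROOFS =====

-- prefix sum of a dict over integer indices [0, k)
def pvS (d : PySem.Dict Int Int) (k : Int) : Int :=
  ((PySem.List.pyRange 0 k 1).map (fun j => d.getD j 0)).sum

theorem pvS_nonpos (d : PySem.Dict Int Int) (k : Int) (h : k ≤ 0) : pvS d k = 0 := by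
  simp [pvS, PySem.List.pyRange_one_eq_nil (by omega : (k:Int) ≤ 0)]

theorem pvS_succ (d : PySem.Dict Int Int) (k : Int) (h : 0 ≤ k) :
    pvS d (k + 1) = pvS d k + d.getD k 0 := by
  simp [pvS, PySem.List.pyRange_one_succ_right h]

theorem pvS_modify (d : PySem.Dict Int Int) (a c : Int) :
    ∀ (n : Nat) (k : Int), k = (n : Int) →
      pvS (d.modify a 0 (· + c)) k = pvS d k + (if 0 ≤ a ∧ a < k then c else 0) := by
  intro n
  induction n with
  | zero => intro k hk; subst hk; simp [pvS_nonpos _ _ le_rfl]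
  | succ m ih =>
    intro k hk
    have h0 : (0:Int) ≤ (m : Int) := by positivity
    have := ih (m : Int) rfl
    subst hk
    push_cast
    rw [pvS_succ _ _ h0, pvS_succ _ _ h0, this, PySem.Dict.getD_modify]
    by_cases hma : (m : Int) = a <;> split_ifs <;> simp_all <;> omega

-- pvS of a modified dict at any k ≥ 0 (Int form)
theorem pvS_modify' (d : PySem.Dict Int Int) (a c k : Int) (hk : 0 ≤ k) :
    pvS (d.modify a 0 (· + c)) k = pvS d k + (if 0 ≤ a ∧ a < k then c else 0) :=
  pvS_modify d a c k.toNat k (by omega)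

-- the covering predicate at grid index k
def pvCover (step : Int) (k : Int) (t : Int × Int) : Bool :=
  decide (t.1 ≤ k * step ∧ t.2 ≥ k * step)

-- ceiling bracket: lo ≤ k ↔ s ≤ k*step  (step > 0)
theorem pvLo_le_iff (s step k : Int) (hs : 0 < step) :
    (-(PySem.Int.floordiv (-s) step) ≤ k) ↔ s ≤ k * step := by
  have h := (PySem.Int.neg_floordiv_neg_eq_iff_of_pos (a := s) (q := -(PySem.Int.floordiv (-s) step)) hs).mp rfl
  set L := -(PySem.Int.floordiv (-s) step) with hL
  constructor
  · intro hk
    have : L * step ≤ k * step := mul_le_mul_of_nonneg_right hk (le_of_lt hs)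
    omega
  · intro hk
    have : (L - 1) * step < k * step := lt_of_lt_of_le h.1 hk
    have := lt_of_mul_lt_mul_right this (le_of_lt hs)
    omega

-- floor bracket: k ≤ hi ↔ k*step ≤ e
theorem pvHi_le_iff (e step k : Int) (hs : 0 < step) :
    (k ≤ PySem.Int.floordiv e step) ↔ k * step ≤ e :=
  PySem.Int.le_floordiv_iff_mul_le hs

-- cover ↔ [lo, hi] membership, for grid indices 0 ≤ k ≤ last
theorem pvCover_iff (step last k : Int) (t : Int × Int) (hs : 0 < step)
    (hk0 : 0 ≤ k) (hkl : k ≤ last) :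
    (pvCover step k t = true) ↔
      (max 0 (-(PySem.Int.floordiv (-(t.1 - 0)) step)) ≤ k ∧
       k ≤ min last (PySem.Int.floordiv (t.2 - 0) step)) := by
  have h1 := pvLo_le_iff (t.1 - 0) step k hs
  have h2 := pvHi_le_iff (t.2 - 0) step k hs
  simp only [pvCover, decide_eq_true_eq, ge_iff_le]
  omega

-- the prefix sums of the delta dict count the covering intervals
theorem pvS_delta (step last : Int) (hs : 0 < step) (k : Int) (hk0 : 0 ≤ k) (hkl : k ≤ last) :
    ∀ (pt : List (Int × Int)) (d : PySem.Dict Int Int),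
      pvS (pt.foldl (fun d t =>
          let lo := max 0 (-(PySem.Int.floordiv (-(t.1 - 0)) step))
          let hi := min last (PySem.Int.floordiv (t.2 - 0) step)
          if lo ≤ hi then (d.modify lo 0 (· + 1)).modify (hi + 1) 0 (· - 1) else d) d) (k + 1)
        = pvS d (k + 1) + (pt.countP (pvCover step k) : Int) := by
  intro pt
  induction pt with
  | nil => intro d; simp
  | cons t rest ih =>
    intro d
    rw [List.foldl_cons, List.countP_cons, ih]
    set lo := max 0 (-(PySem.Int.floordiv (-(t.1 - 0)) step)) with hlo
    set hi := min last (PySem.Int.floordiv (t.2 - 0) step) with hhi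
    have hcov := pvCover_iff step last k t hs hk0 hkl
    by_cases hle : lo ≤ hi
    · simp only [if_pos hle]
      have e1 : ∀ (d' : PySem.Dict Int Int), d'.modify (hi + 1) 0 (· - 1)
          = d'.modify (hi + 1) 0 (· + (-1)) := by intro d'; rfl
      rw [e1, pvS_modify' _ _ _ _ (by omega), pvS_modify' _ _ _ _ (by omega)]
      by_cases hc : pvCover step k t = true
      · have := hcov.mp hc
        rw [if_pos (by omega), if_neg (by omega)]
        simp only [hc, if_true]
        push_cast
        ring
      · have := (not_iff_not.mpr hcov).mp hc
        simp only [hc]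
        by_cases h2 : lo ≤ k
        · rw [if_pos (by omega), if_pos (by omega)]; push_cast; ring
        · rw [if_neg (by omega), if_neg (by omega)]; push_cast; ring
    · simp only [if_neg hle]
      have hc : pvCover step k t = false := by
        rw [Bool.eq_false_iff, ne_eq, hcov]; omega
      simp [hc]

-- A's inner loop counts the covering intervals
theorem pvCountA_eq (pt : List (Int × Int)) (m : Int) :
    pvCountA pt m = (pt.countP (fun t => decide (t.1 ≤ m ∧ t.2 ≥ m)) : Int) := by
  suffices h : ∀ (acc : Int), pt.foldl (fun acc t => if t.1 ≤ m ∧ t.2 ≥ m then acc + 1 else acc) acc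
      = acc + (pt.countP (fun t => decide (t.1 ≤ m ∧ t.2 ≥ m)) : Int) by
    simpa [pvCountA] using h 0
  induction pt with
  | nil => simp
  | cons t rest ih =>
    intro acc
    rw [List.foldl_cons, List.countP_cons, ih]
    by_cases hc : t.1 ≤ m ∧ t.2 ≥ m
    · rw [if_pos hc, if_pos (by simpa using hc)]
      push_cast
      ring
    · rw [if_neg hc, if_neg (by simpa using hc)]
      simp

-- A's while loop, characterised over grid indices
theorem pvALoop_eq (pt : List (Int × Int)) (step last : Int) (hs : 0 < step)
    (hl1 : last * step ≤ 86400) (hl2 : 86400 < (last + 1) * step) :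
    ∀ (n : Nat) (j : Int), 0 ≤ j → (n : Int) = last + 1 - j →
      ∀ (hist : List (Int × Int)),
        pvALoop pt step (j * step) hist
          = hist ++ (PySem.List.pyRange j (last + 1) 1).map
              (fun k => (k * step, pvCountA pt (k * step))) := by
  intro n
  induction n with
  | zero =>
    intro j hj0 hj hist
    have hjl : last + 1 ≤ j := by omega
    have : 86400 < j * step := by
      calc 86400 < (last + 1) * step := hl2
        _ ≤ j * step := mul_le_mul_of_nonneg_right hjl (le_of_lt hs)
    rw [pvALoop, dif_neg (by omega), PySem.List.pyRange_one_eq_nil (by omega)]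
    simp
  | succ m ih =>
    intro j hj0 hj hist
    have hjl : j ≤ last := by omega
    have hm : j * step ≤ 86400 := by
      calc j * step ≤ last * step := mul_le_mul_of_nonneg_right hjl (le_of_lt hs)
        _ ≤ 86400 := hl1
    rw [pvALoop, dif_pos ⟨hm, hs⟩]
    have harith : j * step + step = (j + 1) * step := by ring
    rw [harith, ih (j + 1) (by omega) (by omega)]
    rw [PySem.List.pyRange_one_cons (by omega : j < last + 1)]
    simp

theorem pvStep_pos (columns : Int) (h1 : 1 ≤ columns) (h2 : columns ≤ 86400) :
    0 < PySem.Int.floordiv (86400 - 0) columns := by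
  have := (PySem.Int.le_floordiv_iff_mul_le (a := 86400 - 0) (q := 1) (by omega : (0:Int) < columns)).mpr (by omega)
  omega

-- B's prefix-sum loop, characterised
theorem pvBLoop_eq (d : PySem.Dict Int Int) (step b : Int) :
    ∀ (n : Nat) (a : Int), 0 ≤ a → (n : Int) = b - a →
      ∀ (hist : List (Int × Int)),
        (PySem.List.pyRange a b 1).foldl
          (fun (acc : Int × List (Int × Int)) k =>
            let c := acc.1 + d.getD k 0
            (c, acc.2 ++ [(0 + k * step, c)]))
          (pvS d a, hist)
        = (pvS d b,
           hist ++ (PySem.List.pyRange a b 1).map (fun k => (0 + k * step, pvS d (k + 1)))) := by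
  intro n
  induction n with
  | zero =>
    intro a ha0 ha hist
    have hba : b ≤ a := by omega
    have hba' : b = a := by omega
    rw [PySem.List.pyRange_one_eq_nil hba, hba']
    simp
  | succ m ih =>
    intro a ha0 ha hist
    have hab : a < b := by omega
    rw [PySem.List.pyRange_one_cons hab]
    simp only [List.foldl_cons, List.map_cons]
    rw [show pvS d a + d.getD a 0 = pvS d (a + 1) from (pvS_succ d a ha0).symm]
    rw [ih (a + 1) (by omega) (by omega)]
    simp

-- ===== VERDICT (by name: the statement is the Claim_ definition above) =====
theorem compute_histogram_naive_spec : Claim_equal_compute_histogram_naive := by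
  intro pt columns _ hpre
  obtain ⟨h1, h2⟩ := hpre
  unfold Spec_compute_histogram_naive compute_histogram_naive compute_histogram_naive_alt
  set step := PySem.Int.floordiv (86400 - 0) columns with hstep
  have hs : 0 < step := pvStep_pos columns h1 h2
  set last := PySem.Int.floordiv (86400 - 0) step with hlast
  show pvALoop pt step 0 []
      = ((PySem.List.pyRange 0 (last + 1) 1).foldl
          (fun (acc : Int × List (Int × Int)) k =>
            let c := acc.1 + (pvBDelta step last pt).getD k 0
            (c, acc.2 ++ [(0 + k * step, c)]))
          (0, [])).2
  have hbr := (PySem.Int.floordiv_eq_iff_of_pos (a := 86400 - 0) (b := step) (q := last) hs).mp rfl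
  have hl0 : 0 ≤ last := by
    have := (PySem.Int.le_floordiv_iff_mul_le (a := 86400 - 0) (q := 0) hs).mpr (by omega)
    omega
  -- A side
  have hA := pvALoop_eq pt step last hs (by omega) (by omega) (last + 1).toNat 0 le_rfl
      (by omega) []
  simp only [zero_mul] at hA
  rw [hA]
  -- B side
  have hB := pvBLoop_eq (pvBDelta step last pt) step (last + 1) (last + 1).toNat 0 le_rfl
      (by omega) []
  rw [pvS_nonpos _ 0 le_rfl] at hB
  rw [hB]
  simp only [List.nil_append]
  -- pointwise equality of the two maps
  apply List.map_congr_left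
  intro k hk
  have hkmem := (PySem.List.mem_pyRange_one).mp hk
  have hk0 : 0 ≤ k := hkmem.1
  have hkl : k ≤ last := by omega
  have hSd := pvS_delta step last hs k hk0 hkl pt PySem.Dict.empty
  have hEmpty : pvS PySem.Dict.empty (k + 1) = 0 := by
    simp [pvS, PySem.Dict.getD_empty]
  rw [show (pvBDelta step last pt) = pt.foldl (fun d t =>
      let lo := max 0 (-(PySem.Int.floordiv (-(t.1 - 0)) step))
      let hi := min last (PySem.Int.floordiv (t.2 - 0) step)
      if lo ≤ hi then (d.modify lo 0 (· + 1)).modify (hi + 1) 0 (· - 1) else d)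
      PySem.Dict.empty from rfl] at *
  rw [hSd, hEmpty, pvCountA_eq]
  have hcong : pvCover step k = fun t : Int × Int => decide (t.1 ≤ k * step ∧ k * step ≤ t.2) := by
    funext t
    simp [pvCover, ge_iff_le]
  rw [hcong]
  simp
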